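-- pv_equiv track=rewrite | github.com/Eggertron/python-exercises | alphabet-scan.py | check_alphabets_v2
-- ===== SOURCE A (Python) =====
-- def check_alphabets_v2(words):
--   alphabets = [True] * 26
--   a = ord('a')
--   z = ord('z')
--   results = 0
--   for x in words.lower():
--     char = ord(x)
--     if a <= char and char <= z:
--       pos = char - a
--       if alphabets[pos]:
--         alphabets[pos] = False
--         results += 1
--         if results == 26:
--           return results
--   return results
-- ===== SOURCE B (Python) =====
-- def check_alphabets_v2(words):
--   low = words.lower()
--   return sum(c in low for c in "abcdefghijklmnopqrstuvwxyz")
-- ===== Notes on version B (the rewrite author's own statement) =====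
-- stated objective: alternative
-- what changed: Instead of scanning the string once while maintaining a 26-entry boolean flag array, a running counter and an early-exit branch, B iterates over the fixed alphabet and sums, for each of the 26 letters, a substring membership test in words.lower().
import Mathlib
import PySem

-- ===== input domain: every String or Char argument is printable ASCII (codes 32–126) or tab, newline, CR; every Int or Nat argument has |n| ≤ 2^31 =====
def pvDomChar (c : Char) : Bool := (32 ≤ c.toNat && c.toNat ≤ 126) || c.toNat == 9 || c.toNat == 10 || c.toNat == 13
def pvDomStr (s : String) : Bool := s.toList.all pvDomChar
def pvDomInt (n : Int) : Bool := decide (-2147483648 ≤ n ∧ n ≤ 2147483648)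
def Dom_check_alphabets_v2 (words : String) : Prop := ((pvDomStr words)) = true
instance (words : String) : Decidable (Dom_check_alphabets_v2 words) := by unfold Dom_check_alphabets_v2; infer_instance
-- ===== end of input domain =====

-- B replaces A's single scan with flag array, counter and early exit by the opposite
-- traversal: loop over the fixed alphabet 'a'..'z' and sum a membership test of each
-- letter in words.lower() (alternative algorithm; not claimed faster).

-- ===== PORT A =====
-- loop of A: state = (alphabets, results); early 'return results' when results hits 26.
-- pos is always in [0, 25] and alphabets always has length 26, so the total indexers
-- pyGetD / pySetD are exact here (no IndexError is reachable).
def alphaLoop : List Char → List Bool → Int → Int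
  | [], _, results => results
  | x :: rest, alphabets, results =>
    let char : Int := (x.toNat : Int)
    if 97 ≤ char ∧ char ≤ 122 then
      let pos : Int := char - 97
      if PySem.List.pyGetD alphabets pos false then
        let alphabets' := PySem.List.pySetD alphabets pos false
        let results' := results + 1
        if results' = 26 then results' else alphaLoop rest alphabets' results'
      else alphaLoop rest alphabets results
    else alphaLoop rest alphabets results

def check_alphabets_v2 (words : String) : Int :=
  alphaLoop (PySem.Str.lower words).toList (List.replicate 26 true) 0

-- ===== PORT B =====
-- sum(c in low for c in "abc…z"): fold over the alphabet literal, adding 1 where the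
-- single-character substring test (Python 'c in low' = PySem.Chars.isIn) succeeds.
def check_alphabets_v2_alt (words : String) : Int :=
  let low := PySem.Str.lower words
  ("abcdefghijklmnopqrstuvwxyz".toList).foldl
    (fun acc c => if PySem.Chars.isIn [c] low.toList then acc + 1 else acc) 0

-- ===== PRECONDITION & SPEC =====
def Spec_check_alphabets_v2 (words : String) (out : Int) : Prop := out = check_alphabets_v2_alt words
instance (words : String) (out : Int) : Decidable (Spec_check_alphabets_v2 words out) := by unfold Spec_check_alphabets_v2; infer_instance

-- ===== CLAIM (what is proved, stated in full; the proofs are below) =====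
def Claim_equal_check_alphabets_v2 : Prop := ∀ (words : String), Dom_check_alphabets_v2 words → Spec_check_alphabets_v2 words (check_alphabets_v2 words)

-- ===== LEMMAS AND PROOFS =====

theorem alphaLoop_cons (x : Char) (rest : List Char) (alph : List Bool) (res : Int) :
    alphaLoop (x :: rest) alph res =
      if 97 ≤ (x.toNat : Int) ∧ (x.toNat : Int) ≤ 122 then
        (if PySem.List.pyGetD alph ((x.toNat : Int) - 97) false then
          (if res + 1 = 26 then res + 1
           else alphaLoop rest (PySem.List.pySetD alph ((x.toNat : Int) - 97) false) (res + 1))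
         else alphaLoop rest alph res)
      else alphaLoop rest alph res := rfl

-- the range filter that characterises A's accepted letters, seen on ASCII codes
theorem charFilter_iff (c : Char) :
    ((decide ('a' ≤ c) && decide (c ≤ 'z')) = true) ↔ (97 ≤ c.toNat ∧ c.toNat ≤ 122) := by
  simp only [Bool.and_eq_true, decide_eq_true_eq, Char.le_def, UInt32.le_iff_toNat_le]
  exact Iff.rfl

theorem char_eq_of_toNat_eq {c x : Char} (h : c.toNat = x.toNat) : c = x := by
  apply Char.ext
  exact UInt32.toNat_inj.mp h

theorem getD_set_ite (l : List Bool) (n m : ℕ) (a d : Bool) (hn : n < l.length) :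
    (l.set n a).getD m d = if m = n then a else l.getD m d := by
  rw [List.getD_eq_getElem?_getD, List.getD_eq_getElem?_getD, List.getElem?_set]
  by_cases h : m = n
  · subst h; simp [hn]
  · rw [if_neg (fun hh => h (Eq.symm hh)), if_neg h]

theorem count_true_set_false (l : List Bool) (n : ℕ) (hn : n < l.length)
    (h : l.getD n false = true) : (l.set n false).count true + 1 = l.count true := by
  induction l generalizing n with
  | nil => simp at hn
  | cons b t ih =>
    cases n with
    | zero =>
      simp at h; subst h
      simp
    | succ m =>
      simp at hn h
      have := ih m hn h
      simp only [List.set, List.count_cons]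
      omega

theorem getD_eq_false_of_count_zero (l : List Bool) (n : ℕ)
    (h : l.count true = 0) : l.getD n false = false := by
  rcases Nat.lt_or_ge n l.length with hl | hl
  · have hm : l.getD n false ∈ l := by
      rw [List.getD_eq_getElem l false hl]; exact List.getElem_mem hl
    cases hv : l.getD n false
    · rfl
    · rw [hv] at hm
      have := List.count_pos_iff.mpr hm
      omega
  · simp [List.getD_eq_getElem?_getD, List.getElem?_eq_none (by omega : l.length ≤ n)]

theorem getD_replicate_true (n m : ℕ) (h : m < n) :
    (List.replicate n true).getD m false = true := by
  rw [List.getD_eq_getElem _ _ (by simpa using h)]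
  simp

theorem update_eq_of_forall_mem {s : PySem.Set Char} {xs : List Char}
    (h : ∀ y ∈ xs, y ∈ s) : PySem.Set.update s xs = s := by
  induction xs generalizing s with
  | nil => rfl
  | cons x t ih =>
    rw [PySem.Set.update_cons, PySem.Set.add_of_mem (h x (by simp))]
    exact ih (fun y hy => h y (by simp [hy]))

-- main loop invariant for A: alphabets flags exactly the letters NOT yet in the set s,
-- results = |s|, and |true flags| + |s| = 26 (so results = 26 ⇒ no flag left).
theorem loop_eq (cs : List Char) : ∀ (alph : List Bool) (s : PySem.Set Char),
    alph.length = 26 →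
    alph.count true + s.length = 26 →
    (∀ c : Char, 97 ≤ c.toNat → c.toNat ≤ 122 →
       alph.getD (c.toNat - 97) false = !(decide (c ∈ s))) →
    alphaLoop cs alph (s.length : Int)
      = ((PySem.Set.update s
            (cs.filter (fun c => decide ('a' ≤ c) && decide (c ≤ 'z')))).length : Int) := by
  induction cs with
  | nil => intro alph s _ _ _; simp [alphaLoop]
  | cons x rest ih =>
    intro alph s hlen hcnt hinv
    by_cases hp : 97 ≤ x.toNat ∧ x.toNat ≤ 122
    · -- letter in range
      have hpInt : 97 ≤ (x.toNat : Int) ∧ (x.toNat : Int) ≤ 122 := by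
        constructor <;> omega
      have hposCast : (x.toNat : Int) - 97 = ((x.toNat - 97 : ℕ) : Int) := by omega
      have hposlt : x.toNat - 97 < alph.length := by omega
      have hfilt : (decide ('a' ≤ x) && decide (x ≤ 'z')) = true := (charFilter_iff x).mpr hp
      have hget : PySem.List.pyGetD alph ((x.toNat : Int) - 97) false
          = alph.getD (x.toNat - 97) false := by
        rw [hposCast, PySem.List.pyGetD_natCast]
      rw [alphaLoop_cons, if_pos hpInt, hget]
      by_cases hmem : x ∈ s
      · -- already seen: flag is false, A skips; B's add is a no-op
        have hval : alph.getD (x.toNat - 97) false = false := by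
          rw [hinv x hp.1 hp.2]; simp [hmem]
        rw [hval]
        simp only [Bool.false_eq_true, if_false, List.filter_cons, hfilt, if_true]
        rw [PySem.Set.update_cons, PySem.Set.add_of_mem hmem]
        exact ih alph s hlen hcnt hinv
      · -- new letter
        have hgt : alph.getD (x.toNat - 97) false = true := by
          rw [hinv x hp.1 hp.2]; simp [hmem]
        have hset : PySem.List.pySetD alph ((x.toNat : Int) - 97) false
            = alph.set (x.toNat - 97) false := by
          rw [hposCast, PySem.List.pySetD_natCast]
        have hlen' : (alph.set (x.toNat - 97) false).length = 26 := by
          simp [hlen]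
        have hcnt' : (alph.set (x.toNat - 97) false).count true + (s ++ [x]).length = 26 := by
          have := count_true_set_false alph (x.toNat - 97) hposlt hgt
          simp only [List.length_append, List.length_cons, List.length_nil]
          omega
        have hinv' : ∀ c : Char, 97 ≤ c.toNat → c.toNat ≤ 122 →
            (alph.set (x.toNat - 97) false).getD (c.toNat - 97) false
              = !(decide (c ∈ s ++ [x])) := by
          intro c hc1 hc2
          rw [getD_set_ite alph _ _ _ _ hposlt]
          by_cases hcx : c.toNat - 97 = x.toNat - 97
          · have : c = x := char_eq_of_toNat_eq (by omega)
            subst this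
            simp
          · have hcx2 : c ≠ x := fun h => hcx (by rw [h])
            rw [if_neg hcx, hinv c hc1 hc2]
            simp [hcx2]
        rw [hgt, hset]
        simp only [if_true, List.filter_cons, hfilt]
        rw [PySem.Set.update_cons, PySem.Set.add_of_not_mem hmem]
        by_cases h26 : (s.length : Int) + 1 = 26
        · -- early return: all 26 letters seen, the rest of the string adds nothing
          rw [if_pos h26]
          have hz : (alph.set (x.toNat - 97) false).count true = 0 := by
            simp only [List.length_append, List.length_cons, List.length_nil] at hcnt'
            omega
          have hall : ∀ y ∈ rest.filter (fun c => decide ('a' ≤ c) && decide (c ≤ 'z')),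
              y ∈ s ++ [x] := by
            intro y hy
            have hyp := (charFilter_iff y).mp (by simpa using (List.mem_filter.mp hy).2)
            have hfalse := hinv' y hyp.1 hyp.2
            rw [getD_eq_false_of_count_zero _ _ hz] at hfalse
            by_contra hne
            simp [hne] at hfalse
          rw [update_eq_of_forall_mem hall]
          simp only [List.length_append, List.length_cons, List.length_nil]
          omega
        · rw [if_neg h26]
          have hlencast : (s.length : Int) + 1 = ((s ++ [x]).length : Int) := by
            simp
          rw [hlencast]
          exact ih _ (s ++ [x]) hlen' hcnt' hinv'
    · -- not a letter: both sides skip x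
      have hpInt : ¬ (97 ≤ (x.toNat : Int) ∧ (x.toNat : Int) ≤ 122) := by omega
      have hfilt : (decide ('a' ≤ x) && decide (x ≤ 'z')) = false := by
        cases hb : (decide ('a' ≤ x) && decide (x ≤ 'z'))
        · rfl
        · exact absurd ((charFilter_iff x).mp hb) hp
      rw [alphaLoop_cons, if_neg hpInt]
      simp only [List.filter_cons, hfilt, Bool.false_eq_true, if_false]
      exact ih alph s hlen hcnt hinv

-- bridge: character membership in the alphabet literal is exactly A's range test
theorem mem_alphabet_iff (c : Char) :
    c ∈ "abcdefghijklmnopqrstuvwxyz".toList ↔ (97 ≤ c.toNat ∧ c.toNat ≤ 122) := by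
  have he : "abcdefghijklmnopqrstuvwxyz".toList
      = (List.range 26).map (fun i => Char.ofNat (97 + i)) := by decide
  rw [he]
  constructor
  · intro h
    rcases List.mem_map.mp h with ⟨i, hi, rfl⟩
    have hi' : i < 26 := List.mem_range.mp hi
    have hv : (97 + i) < 1114112 := by omega
    have : (Char.ofNat (97 + i)).toNat = 97 + i := by
      interval_cases i <;> decide
    omega
  · intro ⟨h1, h2⟩
    refine List.mem_map.mpr ⟨c.toNat - 97, List.mem_range.mpr (by omega), ?_⟩
    have : 97 + (c.toNat - 97) = c.toNat := by omega
    rw [this, Char.ofNat_toNat]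

-- the cardinality of the distinct in-range letters of l equals the number of alphabet
-- letters occurring in l (both sides enumerate the same finite set without repetition)
theorem set_len_eq_alphabet_count (l : List Char) :
    ((PySem.Set.ofList (l.filter (fun c => decide ('a' ≤ c) && decide (c ≤ 'z')))).length : Int)
      = (("abcdefghijklmnopqrstuvwxyz".toList).countP (fun c => decide (c ∈ l)) : Int) := by
  have hperm : (PySem.Set.ofList (l.filter (fun c => decide ('a' ≤ c) && decide (c ≤ 'z')))).Perm
      (("abcdefghijklmnopqrstuvwxyz".toList).filter (fun c => decide (c ∈ l))) := by
    rw [List.perm_ext_iff_of_nodup (PySem.Set.nodup_ofList _)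
        (List.Nodup.filter _ (by decide))]
    intro a
    rw [PySem.Set.mem_ofList, List.mem_filter, List.mem_filter]
    constructor
    · intro ⟨ha, hf⟩
      exact ⟨(mem_alphabet_iff a).mpr ((charFilter_iff a).mp hf), by simpa using ha⟩
    · intro ⟨ha, hl⟩
      exact ⟨by simpa using hl, (charFilter_iff a).mpr ((mem_alphabet_iff a).mp ha)⟩
  rw [hperm.length_eq, List.countP_eq_length_filter]

-- B's single-character 'c in low' is plain list membership
theorem isIn_singleton (c : Char) (l : List Char) :
    PySem.Chars.isIn [c] l = decide (c ∈ l) := by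
  by_cases h : c ∈ l
  · simp [h, PySem.Chars.isIn_iff_infix, List.singleton_infix_iff]
  · simp only [h, decide_false]
    rw [PySem.Chars.isIn_eq_false_iff, List.singleton_infix_iff]
    exact h

-- ===== VERDICT (by name: the statement is the Claim_ definition above) =====
theorem check_alphabets_v2_spec : Claim_equal_check_alphabets_v2 := by
  intro words _
  unfold Spec_check_alphabets_v2 check_alphabets_v2 check_alphabets_v2_alt
  have h := loop_eq (PySem.Str.lower words).toList (List.replicate 26 true) PySem.Set.empty
    (by simp) (by simp [PySem.Set.empty]) (by
      intro c h1 h2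
      rw [getD_replicate_true 26 _ (by omega)]
      simp [PySem.Set.empty])
  simp only [PySem.Set.empty, List.length_nil, Int.natCast_zero] at h
  rw [h]
  show ((PySem.Set.ofList (((PySem.Str.lower words).toList).filter
          (fun c => decide ('a' ≤ c) && decide (c ≤ 'z')))).length : Int) = _
  rw [set_len_eq_alphabet_count]
  simp only [isIn_singleton]
  rw [PySem.List.foldl_if_add_one]
  simp
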